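-- pv_equiv track=rewrite | github.com/uio-bmi/NucBreak | find_breakpoints.py | MERGE_FALSE_GAPS_SECOND
-- ===== SOURCE A (Python) =====
-- def MERGE_FALSE_GAPS_SECOND(input_list_init,sup_list):
--
--     new_list=[]
--     input_list=[]
--
--     for i in range(len(input_list_init)):
--        input_list.append([input_list_init[i][0],input_list_init[i][1]])
--
--     overlap_gap_len=10
--     check_int=[0,0]
--     if len(input_list)==1:
--         new_list.append(input_list[0])
--
--
--     elif input_list!=[]:
--
--         first=input_list[0]
--         for i in range(1,len(input_list)):
--             second=input_list[i]
--
--             check_int[0]=first[1]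
--             check_int[1]=second[0]
--
--             flag=0
--             for entry in sup_list:
--                 if entry[0]<=check_int[0] and entry[1]>=check_int[1]:
--                     flag=1
--                     break
--
--
--             if flag==1:
--                 first[1]=second[1]
--             else:
--                 new_list.append([first[0],first[1]])
--                 first=second
--
--         new_list.append([first[0],first[1]])
--
--     i=1
--     for entry in new_list:
--         entry.append(i)
--
--         if i==1:
--            i=2
--         else:
--             i=1
--
--     return new_list
-- ===== SOURCE B (Python) =====
-- def MERGE_FALSE_GAPS_SECOND(input_list_init, sup_list):
--     ivs = [[iv[0], iv[1]] for iv in input_list_init]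
--     n = len(ivs)
--     out = []
--     if n == 1:
--         out.append(ivs[0])
--     elif n > 1:
--         # index sup_list once: starts sorted ascending + prefix maxima of ends,
--         # so each gap query becomes one binary search instead of a scan
--         pts = sorted(((t[0], t[1]) for t in sup_list), key=lambda p: p[0])
--         starts = []
--         maxend = []
--         for s, e in pts:
--             starts.append(s)
--             maxend.append(e if not maxend else max(maxend[-1], e))
--
--         def covered(a, b):
--             # a sup interval [s,e] has s <= a and e >= b  iff  the maximal end
--             # among starts <= a (found by binary search) reaches b
--             lo, hi = 0, len(starts)
--             while lo < hi:
--                 mid = (lo + hi) // 2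
--                 if a < starts[mid]:
--                     hi = mid
--                 else:
--                     lo = mid + 1
--             return lo > 0 and maxend[lo - 1] >= b
--
--         cs, ce = ivs[0]
--         for iv in ivs[1:]:
--             if covered(ce, iv[0]):
--                 ce = iv[1]
--             else:
--                 out.append([cs, ce])
--                 cs, ce = iv[0], iv[1]
--         out.append([cs, ce])
--     for j, entry in enumerate(out):
--         entry.append(1 + j % 2)
--     return out
-- ===== Notes on version B (the rewrite author's own statement) =====
-- stated objective: alternative
-- what changed: B builds a query index over sup_list once (starts sorted ascending plus prefix maxima of ends) and answers each gap-coverage test with one binary search and one lookup, replacing A's linear scan of sup_list per gap; merged groups are tagged by enumeration parity instead of A's toggle loop.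
-- outside the precondition, e.g. on MERGE_FALSE_GAPS_SECOND([[0, 5], [6, 9]], [[0, 10], [7]]): A returns [[0, 9, 1]], B raises IndexError
import Mathlib
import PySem

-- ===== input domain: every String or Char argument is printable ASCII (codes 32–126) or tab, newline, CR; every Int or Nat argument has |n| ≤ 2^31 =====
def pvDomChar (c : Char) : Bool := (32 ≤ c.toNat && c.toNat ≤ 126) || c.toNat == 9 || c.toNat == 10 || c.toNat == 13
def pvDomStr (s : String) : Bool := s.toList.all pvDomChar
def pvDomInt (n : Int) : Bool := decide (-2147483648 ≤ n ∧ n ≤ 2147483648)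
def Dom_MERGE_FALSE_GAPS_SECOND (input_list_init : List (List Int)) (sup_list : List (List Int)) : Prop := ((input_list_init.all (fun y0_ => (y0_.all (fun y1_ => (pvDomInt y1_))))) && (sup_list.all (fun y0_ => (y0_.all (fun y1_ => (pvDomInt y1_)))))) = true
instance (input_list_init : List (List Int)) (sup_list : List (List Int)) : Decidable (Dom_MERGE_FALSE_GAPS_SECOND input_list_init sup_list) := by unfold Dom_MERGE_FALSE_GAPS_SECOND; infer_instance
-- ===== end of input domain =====

-- B replaces A's per-gap linear scan of sup_list by a query structure built once —
-- starts sorted ascending with prefix maxima of ends, each gap answered by one binary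
-- search and one lookup; objective: alternative (indexed queries instead of repeated scans).

-- l[i] for a nonnegative literal index; exact for i < l.length (guaranteed by Pre_)
def pvGA (l : List Int) (i : Nat) : Int := l.getD i 0

-- ===== PORT A =====
-- the inner `for entry in sup_list: if …: flag=1; break`
def pvFlagA (sup : List (List Int)) (c0 c1 : Int) : Bool :=
  match sup with
  | [] => false
  | entry :: rest =>
      if pvGA entry 0 ≤ c0 ∧ c1 ≤ pvGA entry 1 then true else pvFlagA rest c0 c1

-- the main `for i in range(1, len(input_list))` loop; state = (first, new_list)
def pvMergeA (sup : List (List Int)) : List Int → List (List Int) → List (List Int) →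
    List Int × List (List Int)
  | first, acc, [] => (first, acc)
  | first, acc, second :: rest =>
      if pvFlagA sup (pvGA first 1) (pvGA second 0) then
        pvMergeA sup [pvGA first 0, pvGA second 1] acc rest
      else
        pvMergeA sup second (acc ++ [[pvGA first 0, pvGA first 1]]) rest

-- the final tag loop: append i, toggling i between 1 and 2
def pvTagA : Int → List (List Int) → List (List Int)
  | _, [] => []
  | i, e :: rest => (e ++ [i]) :: pvTagA (if i == 1 then 2 else 1) rest

def MERGE_FALSE_GAPS_SECOND (input_list_init : List (List Int)) (sup_list : List (List Int)) : List (List Int) :=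
  -- the copy loop `for i in range(len(...)): input_list.append([x[i][0], x[i][1]])`
  let input_list := input_list_init.map (fun e => [pvGA e 0, pvGA e 1])
  let new_list : List (List Int) :=
    match input_list with
    | [x] => [x]                 -- len(input_list) == 1 branch
    | [] => []                   -- input_list == [] : main loop skipped
    | first :: rest =>
        let p := pvMergeA sup_list first [] rest
        p.2 ++ [[pvGA p.1 0, pvGA p.1 1]]
  pvTagA 1 new_list

-- ===== PORT B =====
-- l[i] for a nonnegative literal index; B's own copy (the ports share no helpers)
def pvGB (l : List Int) (i : Nat) : Int := l.getD i 0

-- the hand-written `while lo < hi` binary search inside covered()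
def pvBisr (starts : List Int) (a : Int) (lo hi : Nat) : Nat :=
  if lo < hi then
    if a < starts.getD ((lo + hi) / 2) 0 then pvBisr starts a lo ((lo + hi) / 2)
    else pvBisr starts a ((lo + hi) / 2 + 1) hi
  else lo
termination_by hi - lo
decreasing_by all_goals omega

-- covered(a, b): binary search for the rightmost start <= a, then one prefix-max lookup
-- (maxend[lo-1] is in range whenever lo > 0, so getD is exact there)
def pvCovB (starts maxend : List Int) (a b : Int) : Bool :=
  let lo := pvBisr starts a 0 starts.length
  decide (0 < lo) && decide (b ≤ maxend.getD (lo - 1) 0)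

-- the index-building loop: starts.append(s); maxend.append(e if not maxend else max(maxend[-1], e))
def pvBuildIdx (pts : List (Int × Int)) : List Int × List Int :=
  pts.foldl (fun st p =>
    (st.1 ++ [p.1],
     st.2 ++ [if st.2.isEmpty then p.2 else max (PySem.List.pyGetD st.2 (-1) 0) p.2]))
    ([], [])

-- the `for iv in ivs[1:]` merge loop; builds `out` front-to-back by recursion
def pvMergeB (starts maxend : List Int) (cs ce : Int) : List (List Int) → List (List Int)
  | [] => [[cs, ce]]
  | iv :: rest =>
      if pvCovB starts maxend ce (pvGB iv 0) then
        pvMergeB starts maxend cs (pvGB iv 1) rest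
      else
        [cs, ce] :: pvMergeB starts maxend (pvGB iv 0) (pvGB iv 1) rest

def MERGE_FALSE_GAPS_SECOND_alt (input_list_init : List (List Int)) (sup_list : List (List Int)) : List (List Int) :=
  let ivs := input_list_init.map (fun iv => [pvGB iv 0, pvGB iv 1])
  let out : List (List Int) :=
    match ivs with
    | [] => []
    | x :: rest =>
        match rest with
        | [] => [x]           -- n == 1
        | _ :: _ =>           -- n > 1: build the index once, then merge
            let idx := pvBuildIdx
              (PySem.List.sorted (sup_list.map (fun t => (pvGB t 0, pvGB t 1))) (fun p => p.1) false)
            pvMergeB idx.1 idx.2 (pvGB x 0) (pvGB x 1) rest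
  (PySem.List.enumerate out 0).map (fun p => [pvGB p.2 0, pvGB p.2 1, 1 + PySem.Int.mod p.1 2])

-- ===== PRECONDITION & SPEC =====
-- Pre_ excludes inputs containing an inner list of fewer than 2 elements: indexing [0]/[1]
-- raises IndexError in both programs there (A can still return on a few such inputs when a
-- short sup entry sits after a covering one, since its scan breaks early; B reads every sup
-- entry while building its index and raises).
def Pre_MERGE_FALSE_GAPS_SECOND (input_list_init : List (List Int)) (sup_list : List (List Int)) : Prop :=
  (∀ e ∈ input_list_init, 2 ≤ e.length) ∧
    (2 ≤ input_list_init.length → ∀ e ∈ sup_list, 2 ≤ e.length)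
instance (input_list_init : List (List Int)) (sup_list : List (List Int)) : Decidable (Pre_MERGE_FALSE_GAPS_SECOND input_list_init sup_list) := by unfold Pre_MERGE_FALSE_GAPS_SECOND; infer_instance

def pvWitness_MERGE_FALSE_GAPS_SECOND : List (List Int) × List (List Int) :=
  ([[0, 5], [8, 20], [30, 41]], [[4, 9]])

def Spec_MERGE_FALSE_GAPS_SECOND (input_list_init : List (List Int)) (sup_list : List (List Int)) (out : List (List Int)) : Prop := out = MERGE_FALSE_GAPS_SECOND_alt input_list_init sup_list
instance (input_list_init : List (List Int)) (sup_list : List (List Int)) (out : List (List Int)) : Decidable (Spec_MERGE_FALSE_GAPS_SECOND input_list_init sup_list out) := by unfold Spec_MERGE_FALSE_GAPS_SECOND; infer_instance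

-- ===== CLAIM (what is proved, stated in full; the proofs are below) =====
def Claim_equal_MERGE_FALSE_GAPS_SECOND : Prop := ∀ (input_list_init : List (List Int)) (sup_list : List (List Int)), Dom_MERGE_FALSE_GAPS_SECOND input_list_init sup_list → Pre_MERGE_FALSE_GAPS_SECOND input_list_init sup_list → Spec_MERGE_FALSE_GAPS_SECOND input_list_init sup_list (MERGE_FALSE_GAPS_SECOND input_list_init sup_list)

-- ===== LEMMAS AND PROOFS =====

@[simp] theorem pvGB_eq : pvGB = pvGA := rfl

-- ---- the coverage query: B's indexed lookup equals A's scan ----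

-- monotone entries from Pairwise (· ≤ ·)
theorem pvMono (starts : List Int) (hs : starts.Pairwise (· ≤ ·)) (i j : Nat)
    (hij : i ≤ j) (hj : j < starts.length) :
    starts.getD i 0 ≤ starts.getD j 0 := by
  rcases Nat.lt_or_eq_of_le hij with h | h
  · have := (List.pairwise_iff_getElem.mp hs) i j (by omega) hj h
    rwa [List.getD_eq_getElem _ _ (by omega), List.getD_eq_getElem _ _ hj]
  · subst h; exact le_refl _

-- the binary search returns the count of leading entries ≤ a
theorem pvBisr_spec (starts : List Int) (hs : starts.Pairwise (· ≤ ·)) (a : Int) :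
    ∀ (n lo hi : Nat), hi - lo ≤ n → lo ≤ hi → hi ≤ starts.length →
      lo ≤ pvBisr starts a lo hi ∧ pvBisr starts a lo hi ≤ hi ∧
      (∀ i, lo ≤ i → i < pvBisr starts a lo hi → starts.getD i 0 ≤ a) ∧
      (∀ i, pvBisr starts a lo hi ≤ i → i < hi → a < starts.getD i 0) := by
  intro n
  induction n with
  | zero =>
      intro lo hi hn hlh _
      have : lo = hi := by omega
      subst this
      rw [pvBisr]; simp
      constructor <;> intro i <;> omega
  | succ n ih =>
      intro lo hi hn hlh hhi
      by_cases h : lo < hi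
      · have hmid : lo ≤ (lo + hi) / 2 ∧ (lo + hi) / 2 < hi := by omega
        rw [pvBisr, if_pos h]
        by_cases hc : a < starts.getD ((lo + hi) / 2) 0
        · rw [if_pos hc]
          obtain ⟨h1, h2, h3, h4⟩ := ih lo ((lo + hi) / 2) (by omega) (by omega) (by omega)
          refine ⟨h1, by omega, h3, ?_⟩
          intro i hri hih
          by_cases him : i < (lo + hi) / 2
          · exact h4 i hri him
          · exact lt_of_lt_of_le hc (pvMono starts hs _ i (by omega) (by omega))
        · rw [if_neg hc]
          push Not at hc
          obtain ⟨h1, h2, h3, h4⟩ := ih ((lo + hi) / 2 + 1) hi (by omega) (by omega) hhi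
          refine ⟨by omega, h2, ?_, h4⟩
          intro i hli hir
          by_cases him : (lo + hi) / 2 + 1 ≤ i
          · exact h3 i him hir
          · exact le_trans (pvMono starts hs i ((lo + hi) / 2) (by omega) (by omega)) hc
      · rw [pvBisr, if_neg h]
        refine ⟨le_refl _, by omega, ?_, ?_⟩ <;> intro i <;> omega

-- structural description of the prefix-maximum list
def pvPmaxFrom (cur : Int) : List (Int × Int) → List Int
  | [] => []
  | p :: r => max cur p.2 :: pvPmaxFrom (max cur p.2) r

def pvPmax : List (Int × Int) → List Int
  | [] => []
  | p :: r => p.2 :: pvPmaxFrom p.2 r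

theorem pvBuildIdx_go :
    ∀ (Q : List (Int × Int)) (s m : List Int) (cur : Int), m ≠ [] →
      PySem.List.pyGetD m (-1) 0 = cur →
      Q.foldl (fun st p =>
          (st.1 ++ [p.1],
           st.2 ++ [if st.2.isEmpty then p.2 else max (PySem.List.pyGetD st.2 (-1) 0) p.2]))
        (s, m) = (s ++ Q.map Prod.fst, m ++ pvPmaxFrom cur Q) := by
  intro Q
  induction Q with
  | nil => intro s m cur _ _; simp [pvPmaxFrom]
  | cons p r ih =>
      intro s m cur hm hcur
      have hne : m.isEmpty = false := by simpa using hm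
      simp only [List.foldl_cons, hne, hcur, Bool.false_eq_true, if_false]
      rw [ih (s ++ [p.1]) (m ++ [max cur p.2]) (max cur p.2) (by simp)
        (PySem.List.pyGetD_neg_one_append_singleton m (max cur p.2) 0)]
      simp [pvPmaxFrom, List.append_assoc]

theorem pvBuildIdx_eq (Q : List (Int × Int)) :
    pvBuildIdx Q = (Q.map Prod.fst, pvPmax Q) := by
  cases Q with
  | nil => rfl
  | cons p r =>
      unfold pvBuildIdx
      simp only [List.foldl_cons, List.isEmpty_nil, if_true, List.nil_append]
      rw [pvBuildIdx_go r [p.1] [p.2] p.2 (by simp)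
        (PySem.List.pyGetD_neg_one_append_singleton [] p.2 0)]
      simp [pvPmax]

-- prefix-max query: one lookup answers "some end among the first j+1 reaches b"
theorem pvPmaxFrom_getD (b : Int) :
    ∀ (r : List (Int × Int)) (cur : Int) (j : Nat), j < r.length →
      (b ≤ (pvPmaxFrom cur r).getD j 0 ↔
        b ≤ cur ∨ ∃ i, i ≤ j ∧ b ≤ (r.getD i (0, 0)).2) := by
  intro r
  induction r with
  | nil => intro cur j hj; simp at hj
  | cons p t ih =>
      intro cur j hj
      cases j with
      | zero => simp [pvPmaxFrom]
      | succ j =>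
          simp only [pvPmaxFrom, List.getD_cons_succ]
          rw [ih (max cur p.2) j (by simpa using hj)]
          constructor
          · rintro (h | ⟨i, hi, h⟩)
            · rcases le_max_iff.mp h with h | h
              · exact Or.inl h
              · exact Or.inr ⟨0, by omega, by simpa using h⟩
            · exact Or.inr ⟨i + 1, by omega, by simpa using h⟩
          · rintro (h | ⟨i, hi, h⟩)
            · exact Or.inl (le_trans h (le_max_left _ _))
            · cases i with
              | zero => exact Or.inl (le_trans (by simpa using h) (le_max_right _ _))
              | succ i => exact Or.inr ⟨i, by omega, by simpa using h⟩

theorem pvPmax_getD (b : Int) (Q : List (Int × Int)) (j : Nat) (hj : j < Q.length) :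
    b ≤ (pvPmax Q).getD j 0 ↔ ∃ i, i ≤ j ∧ b ≤ (Q.getD i (0, 0)).2 := by
  cases Q with
  | nil => simp at hj
  | cons p t =>
      cases j with
      | zero => simp [pvPmax]
      | succ j =>
          simp only [pvPmax, List.getD_cons_succ]
          rw [pvPmaxFrom_getD b t p.2 j (by simpa using hj)]
          constructor
          · rintro (h | ⟨i, hi, h⟩)
            · exact ⟨0, by omega, by simpa using h⟩
            · exact ⟨i + 1, by omega, by simpa using h⟩
          · rintro ⟨i, hi, h⟩
            cases i with
            | zero => exact Or.inl (by simpa using h)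
            | succ i => exact Or.inr ⟨i, by omega, by simpa using h⟩

-- A's scan as an existential
theorem pvFlagA_iff (sup : List (List Int)) (a b : Int) :
    pvFlagA sup a b = true ↔ ∃ t ∈ sup, pvGA t 0 ≤ a ∧ b ≤ pvGA t 1 := by
  induction sup with
  | nil => simp [pvFlagA]
  | cons e rest ih =>
      simp only [pvFlagA]
      split_ifs with h
      · simp only [true_iff]
        exact ⟨e, List.mem_cons_self .., h⟩
      · rw [ih]
        constructor
        · rintro ⟨t, ht, h1, h2⟩; exact ⟨t, List.mem_cons_of_mem _ ht, h1, h2⟩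
        · rintro ⟨t, ht, h1, h2⟩
          rcases List.mem_cons.mp ht with rfl | ht
          · exact absurd ⟨h1, h2⟩ h
          · exact ⟨t, ht, h1, h2⟩

-- B's query over the sorted index equals the existential over the pair list
theorem pvCovB_sorted_iff (Q : List (Int × Int)) (hQ : (Q.map Prod.fst).Pairwise (· ≤ ·))
    (a b : Int) :
    pvCovB (Q.map Prod.fst) (pvPmax Q) a b = true ↔ ∃ p ∈ Q, p.1 ≤ a ∧ b ≤ p.2 := by
  unfold pvCovB
  set L := (Q.map Prod.fst).length with hL
  have hlen : L = Q.length := by simp [hL]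
  obtain ⟨h1, h2, h3, h4⟩ :=
    pvBisr_spec (Q.map Prod.fst) hQ a L 0 L (by omega) (by omega) (by simp [hL])
  set r := pvBisr (Q.map Prod.fst) a 0 L with hr
  have hstarts : ∀ i : Nat, i < Q.length →
      (Q.map Prod.fst).getD i 0 = (Q.getD i (0, 0)).1 := by
    intro i hi
    rw [List.getD_eq_getElem _ _ (by simpa using hi), List.getD_eq_getElem _ _ hi,
      List.getElem_map]
  simp only [Bool.and_eq_true, decide_eq_true_eq]
  constructor
  · rintro ⟨hpos, hb⟩
    rw [pvPmax_getD b Q (r - 1) (by omega)] at hb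
    obtain ⟨i, hi, hbe⟩ := hb
    have hia : (Q.getD i (0, 0)).1 ≤ a := by
      rw [← hstarts i (by omega)]
      exact h3 i (by omega) (by omega)
    refine ⟨Q.getD i (0, 0), ?_, hia, hbe⟩
    rw [List.getD_eq_getElem _ _ (by omega)]
    exact List.getElem_mem _
  · rintro ⟨p, hp, hpa, hpb⟩
    obtain ⟨i, hi, rfl⟩ := List.mem_iff_getElem.mp hp
    have hir : i < r := by
      by_contra hcon
      push Not at hcon
      have := h4 i hcon (by omega)
      rw [hstarts i hi, List.getD_eq_getElem _ _ hi] at this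
      omega
    refine ⟨by omega, ?_⟩
    rw [pvPmax_getD b Q (r - 1) (by omega)]
    exact ⟨i, by omega, by rwa [List.getD_eq_getElem _ _ hi]⟩

-- the two coverage tests agree
theorem pvCov_eq_flag (sup : List (List Int)) (a b : Int) :
    pvCovB (pvBuildIdx (PySem.List.sorted (sup.map (fun t => (pvGA t 0, pvGA t 1)))
        (fun p => p.1) false)).1
      (pvBuildIdx (PySem.List.sorted (sup.map (fun t => (pvGA t 0, pvGA t 1)))
        (fun p => p.1) false)).2 a b = pvFlagA sup a b := by
  set Q := PySem.List.sorted (sup.map (fun t => (pvGA t 0, pvGA t 1))) (fun p => p.1) false with hQ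
  have hperm : Q.Perm (sup.map (fun t => (pvGA t 0, pvGA t 1))) :=
    PySem.List.sorted_perm _ _ _
  have hpw : (Q.map Prod.fst).Pairwise (· ≤ ·) := by
    have := PySem.List.sorted_map_key_pairwise (xs := sup.map (fun t => (pvGA t 0, pvGA t 1)))
      (key := fun p => p.1)
    simpa using this
  rw [pvBuildIdx_eq]
  rw [Bool.eq_iff_iff, pvCovB_sorted_iff Q hpw a b, pvFlagA_iff]
  constructor
  · rintro ⟨p, hp, h1, h2⟩
    have : p ∈ sup.map (fun t => (pvGA t 0, pvGA t 1)) := hperm.mem_iff.mp hp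
    obtain ⟨t, ht, rfl⟩ := List.mem_map.mp this
    exact ⟨t, ht, h1, h2⟩
  · rintro ⟨t, ht, h1, h2⟩
    exact ⟨(pvGA t 0, pvGA t 1), hperm.mem_iff.mpr (List.mem_map.mpr ⟨t, ht, rfl⟩), h1, h2⟩

-- ---- the merge loops agree ----

theorem pvMergeA_acc (sup : List (List Int)) (rest : List (List Int)) :
    ∀ (f : List Int) (acc : List (List Int)),
      pvMergeA sup f acc rest =
        ((pvMergeA sup f [] rest).1, acc ++ (pvMergeA sup f [] rest).2) := by
  induction rest with
  | nil => intro f acc; simp [pvMergeA]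
  | cons s rs ih =>
      intro f acc
      simp only [pvMergeA]
      split_ifs with h
      · exact ih _ acc
      · rw [ih s (acc ++ [[pvGA f 0, pvGA f 1]]), ih s ([] ++ [[pvGA f 0, pvGA f 1]])]
        simp

theorem pvMergeA_eq_mergeB (sup : List (List Int)) (starts maxend : List Int)
    (hcov : ∀ a b, pvCovB starts maxend a b = pvFlagA sup a b) (rest : List (List Int)) :
    ∀ f : List Int,
      (pvMergeA sup f [] rest).2 ++
          [[pvGA (pvMergeA sup f [] rest).1 0, pvGA (pvMergeA sup f [] rest).1 1]] =
        pvMergeB starts maxend (pvGA f 0) (pvGA f 1) rest := by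
  induction rest with
  | nil => intro f; simp [pvMergeA, pvMergeB]
  | cons s rs ih =>
      intro f
      simp only [pvMergeA, pvMergeB, pvGB_eq, hcov]
      split_ifs with h
      · rw [ih [pvGA f 0, pvGA s 1]]
        simp [pvGA]
      · rw [pvMergeA_acc]
        simp only [List.nil_append]
        rw [← ih s]
        simp

-- every merged entry is a two-element list
theorem pvMergeB_shape (starts maxend : List Int) (rest : List (List Int)) :
    ∀ (cs ce : Int), ∀ e ∈ pvMergeB starts maxend cs ce rest, ∃ a b, e = [a, b] := by
  induction rest with
  | nil =>
      intro cs ce e he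
      simp [pvMergeB] at he
      exact ⟨cs, ce, he⟩
  | cons s rs ih =>
      intro cs ce e he
      simp only [pvMergeB] at he
      split_ifs at he with h
      · exact ih _ _ e he
      · rcases List.mem_cons.mp he with rfl | he
        · exact ⟨cs, ce, rfl⟩
        · exact ih _ _ e he

-- ---- the tag passes agree ----

theorem pvTagA_eq_enum (l : List (List Int)) :
    ∀ k : Int, 0 ≤ k → (∀ e ∈ l, ∃ a b, e = [a, b]) →
      pvTagA (1 + PySem.Int.mod k 2) l =
        (PySem.List.enumerate l k).map
          (fun p => [pvGA p.2 0, pvGA p.2 1, 1 + PySem.Int.mod p.1 2]) := by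
  induction l with
  | nil => intro k _ _; simp [pvTagA, PySem.List.enumerate_nil]
  | cons e rest ih =>
      intro k hk hsh
      obtain ⟨a, b, rfl⟩ := hsh _ (List.mem_cons_self ..)
      have hm : PySem.Int.mod k 2 = k % 2 := PySem.Int.mod_eq_emod_of_pos (by norm_num)
      have hm' : PySem.Int.mod (k + 1) 2 = (k + 1) % 2 := PySem.Int.mod_eq_emod_of_pos (by norm_num)
      have htog : (if (1 + PySem.Int.mod k 2) == 1 then (2 : Int) else 1) =
          1 + PySem.Int.mod (k + 1) 2 := by
        rw [hm, hm']
        have h2 : k % 2 = 0 ∨ k % 2 = 1 := by omega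
        rcases h2 with h2 | h2 <;> simp [h2] <;> omega
      rw [PySem.List.enumerate_cons]
      simp only [pvTagA, List.map_cons, htog]
      rw [ih (k + 1) (by omega) (fun e he => hsh e (List.mem_cons_of_mem _ he))]
      simp [pvGA]

-- ---- main ----

theorem main_eq (input_list_init sup_list : List (List Int)) :
    MERGE_FALSE_GAPS_SECOND input_list_init sup_list =
      MERGE_FALSE_GAPS_SECOND_alt input_list_init sup_list := by
  unfold MERGE_FALSE_GAPS_SECOND MERGE_FALSE_GAPS_SECOND_alt
  simp only [pvGB_eq]
  cases hl : input_list_init.map (fun e => [pvGA e 0, pvGA e 1]) with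
  | nil => simp [pvTagA, PySem.List.enumerate_nil]
  | cons x xs =>
      cases xs with
      | nil =>
          have hx : ∃ a b, x = [a, b] := by
            rcases List.map_eq_cons_iff.mp hl with ⟨e, _, _, he, _⟩
            exact ⟨_, _, he.symm⟩
          obtain ⟨a, b, rfl⟩ := hx
          have ht := pvTagA_eq_enum [[a, b]] 0 le_rfl (by
            intro e he
            simp at he
            exact ⟨a, b, he⟩)
          rw [show (1 : Int) + PySem.Int.mod 0 2 = 1 from by decide] at ht
          exact ht
      | cons s rs =>
          set idx := pvBuildIdx
            (PySem.List.sorted (sup_list.map (fun t => (pvGA t 0, pvGA t 1)))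
              (fun p => p.1) false) with hidx
          have hcov : ∀ a b, pvCovB idx.1 idx.2 a b = pvFlagA sup_list a b := by
            intro a b; rw [hidx]; exact pvCov_eq_flag sup_list a b
          have hmerge := pvMergeA_eq_mergeB sup_list idx.1 idx.2 hcov (s :: rs) x
          have hsh : ∀ e ∈ pvMergeB idx.1 idx.2 (pvGA x 0) (pvGA x 1) (s :: rs),
              ∃ a b, e = [a, b] := pvMergeB_shape idx.1 idx.2 (s :: rs) _ _
          have ht := pvTagA_eq_enum (pvMergeB idx.1 idx.2 (pvGA x 0) (pvGA x 1) (s :: rs))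
            0 le_rfl hsh
          rw [show (1 : Int) + PySem.Int.mod 0 2 = 1 from by decide] at ht
          simp only []
          rw [hmerge, ht]

-- ===== VERDICT (by name: the statement is the Claim_ definition above) =====
theorem MERGE_FALSE_GAPS_SECOND_spec : Claim_equal_MERGE_FALSE_GAPS_SECOND := by
  intro inp sup _ _
  unfold Spec_MERGE_FALSE_GAPS_SECOND
  exact main_eq inp sup
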